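-- pv_equiv track=rewrite | github.com/RobertPaulig/Geometric_table | scripts/accuracy_a1_isomers_a3_5_edge_coherence.py | _ring_edge_counts
-- ===== SOURCE A (Python) =====
-- from typing import Iterable, Sequence
--
-- def _ring_edge_counts(cycles: Sequence[Sequence[int]]) -> tuple[int, int, int]:
--     ring_count = 0
--     edge_counts: dict[frozenset[int], int] = {}
--     for cyc in cycles:
--         atoms = [int(x) for x in cyc]
--         m = len(atoms)
--         if m < 3:
--             continue
--         ring_count += 1
--         for k in range(m):
--             a = atoms[k]
--             b = atoms[(k + 1) % m]
--             e = frozenset((a, b))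
--             edge_counts[e] = int(edge_counts.get(e, 0)) + 1
--     n_ring_edges = int(len(edge_counts))
--     n_shared_edges = int(sum(1 for c in edge_counts.values() if int(c) > 1))
--     return int(ring_count), int(n_ring_edges), int(n_shared_edges)
-- ===== SOURCE B (Python) =====
-- from typing import Sequence
--
--
-- def _ring_edge_counts(cycles: Sequence[Sequence[int]]) -> tuple[int, int, int]:
--     kept = [[int(x) for x in c] for c in cycles if len(c) >= 3]
--     edges = sorted((a, b) if a <= b else (b, a)
--                    for c in kept for a, b in zip(c, c[1:] + c[:1]))
--     unique = shared = run = 0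
--     prev = None
--     for e in edges:
--         if run > 0 and e == prev:
--             run += 1
--         else:
--             if run > 1:
--                 shared += 1
--             unique += 1
--             prev, run = e, 1
--     if run > 1:
--         shared += 1
--     return (len(kept), unique, shared)
-- ===== Notes on version B (the rewrite author's own statement) =====
-- stated objective: alternative
-- what changed: Replaces A's incremental edge->count dict and the final tally over its values with a sort-then-scan algorithm: all normalized edges are flattened into one list, sorted (Python tuple order), and a single linear scan over adjacent runs counts unique edges and runs of length >= 2.
import Mathlib
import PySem

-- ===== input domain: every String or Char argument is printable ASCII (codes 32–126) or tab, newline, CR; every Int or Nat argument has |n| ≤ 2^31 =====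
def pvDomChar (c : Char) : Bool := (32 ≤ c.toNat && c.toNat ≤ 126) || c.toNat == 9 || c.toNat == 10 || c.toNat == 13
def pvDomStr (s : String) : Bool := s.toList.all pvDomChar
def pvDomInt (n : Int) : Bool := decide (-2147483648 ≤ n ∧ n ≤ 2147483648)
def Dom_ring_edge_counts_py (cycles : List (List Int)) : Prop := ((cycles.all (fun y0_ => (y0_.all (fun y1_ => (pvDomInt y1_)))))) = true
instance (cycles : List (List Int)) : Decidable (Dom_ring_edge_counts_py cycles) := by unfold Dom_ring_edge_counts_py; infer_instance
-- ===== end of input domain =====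

-- B replaces A's edge→count dict (and its final tally over the values) by a different
-- algorithm: flatten all normalized edges into one list, sort it, and count adjacent
-- runs in a single linear scan; objective: alternative (O(E) hash counting vs O(E log E) sort-scan).

-- frozenset {a, b} of two ints / the normalized tuple (min, max): both ports normalize an edge this way
def pvEdge (a b : Int) : Int × Int := if a ≤ b then (a, b) else (b, a)

-- ===== PORT A =====
def ring_edge_counts_py (cycles : List (List Int)) : Int × Int × Int :=
  let st := cycles.foldl
    (fun (st : Int × PySem.Dict (Int × Int) Int) cyc =>
      let atoms := cyc.map (fun x => x)
      let m : Int := (atoms.length : Int)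
      if m < 3 then st
      else
        let rc := st.1 + 1
        let d := (PySem.List.pyRange 0 m).foldl
          (fun d k =>
            let a := PySem.List.pyGetD atoms k 0
            let b := PySem.List.pyGetD atoms (PySem.Int.mod (k + 1) m) 0
            let e := pvEdge a b
            d.insert e (d.getD e 0 + 1))
          st.2
        (rc, d))
    ((0 : Int), PySem.Dict.empty)
  (st.1, (st.2.size : Int), (st.2.values.countP (fun c => decide (1 < c)) : Int))

-- ===== PORT B =====
def ring_edge_counts_py_alt (cycles : List (List Int)) : Int × Int × Int :=
  let kept := (cycles.filter (fun c => decide (3 ≤ (c.length : Int)))).map (fun c => c.map (fun x => x))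
  let edges := PySem.List.sorted2
    (kept.flatMap (fun c => (c.zip (c.drop 1 ++ c.take 1)).map (fun ab => pvEdge ab.1 ab.2)))
    (fun e => e.1) (fun e => e.2) false
  let st := edges.foldl
    (fun (st : Int × Int × Int × Option (Int × Int)) e =>
      if 0 < st.2.2.1 ∧ some e = st.2.2.2 then
        (st.1, st.2.1, st.2.2.1 + 1, st.2.2.2)
      else
        (st.1 + 1, (if 1 < st.2.2.1 then st.2.1 + 1 else st.2.1), 1, some e))
    ((0 : Int), (0 : Int), (0 : Int), (none : Option (Int × Int)))
  ((kept.length : Int), st.1, if 1 < st.2.2.1 then st.2.1 + 1 else st.2.1)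

-- ===== PRECONDITION & SPEC =====
def Spec_ring_edge_counts_py (cycles : List (List Int)) (out : Int × Int × Int) : Prop := out = ring_edge_counts_py_alt cycles
instance (cycles : List (List Int)) (out : Int × Int × Int) : Decidable (Spec_ring_edge_counts_py cycles out) := by unfold Spec_ring_edge_counts_py; infer_instance

-- ===== CLAIM (what is proved, stated in full; the proofs are below) =====
def Claim_equal_ring_edge_counts_py : Prop := ∀ (cycles : List (List Int)), Dom_ring_edge_counts_py cycles → Spec_ring_edge_counts_py cycles (ring_edge_counts_py cycles)

-- ===== LEMMAS AND PROOFS =====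

-- the undirected edges of one kept cycle (empty for a skipped one)
def pvEdges (cyc : List Int) : List (Int × Int) :=
  if (cyc.length : Int) < 3 then []
  else (cyc.zip (cyc.drop 1 ++ cyc.take 1)).map (fun ab => pvEdge ab.1 ab.2)

def pvStepD (d : PySem.Dict (Int × Int) Int) (e : Int × Int) : PySem.Dict (Int × Int) Int :=
  d.insert e (d.getD e 0 + 1)

-- the two components of A's outer loop step, for PySem.List.foldl_prod_mk
def pvFRC (rc : Int) (cyc : List Int) : Int :=
  if ((cyc.length : Int)) < 3 then rc else rc + 1

def pvGA (d : PySem.Dict (Int × Int) Int) (cyc : List Int) : PySem.Dict (Int × Int) Int :=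
  if ((cyc.length : Int)) < 3 then d
  else (PySem.List.pyRange 0 (cyc.length : Int)).foldl
    (fun d k => pvStepD d (pvEdge (PySem.List.pyGetD cyc k 0)
      (PySem.List.pyGetD cyc (PySem.Int.mod (k + 1) (cyc.length : Int)) 0))) d

-- B's scan step
def pvScan (st : Int × Int × Int × Option (Int × Int)) (e : Int × Int) :
    Int × Int × Int × Option (Int × Int) :=
  if 0 < st.2.2.1 ∧ some e = st.2.2.2 then
    (st.1, st.2.1, st.2.2.1 + 1, st.2.2.2)
  else
    (st.1 + 1, (if 1 < st.2.2.1 then st.2.1 + 1 else st.2.1), 1, some e)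

-- the scan result after the final run flush
def pvScanFin (xs : List (Int × Int)) (st : Int × Int × Int × Option (Int × Int)) : Int × Int :=
  let r := xs.foldl pvScan st
  (r.1, if 1 < r.2.2.1 then r.2.1 + 1 else r.2.1)

-- the canonical answer: number of distinct elements, number of distinct elements of count ≥ 2
def pvND (xs : List (Int × Int)) : Nat := xs.toFinset.card
def pvNH (xs : List (Int × Int)) : Nat := (xs.toFinset.filter (fun k => 1 < xs.count k)).card

-- B's sorting comparator (what sorted2 with keys fst, snd uses), and the order it produces
def pvBef (a b : Int × Int) : Bool :=
  decide (a.1 < b.1) || (!decide (b.1 < a.1) && decide (a.2 < b.2))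

def pvR (a b : Int × Int) : Prop := pvBef b a = false

lemma pvR_iff (a b : Int × Int) : pvR a b ↔ (a.1 < b.1 ∨ (a.1 = b.1 ∧ a.2 ≤ b.2)) := by
  obtain ⟨a1, a2⟩ := a; obtain ⟨b1, b2⟩ := b
  simp [pvR, pvBef]
  omega

lemma pvBef_asym (a b : Int × Int) : pvBef a b = true → pvBef b a = false := by
  obtain ⟨a1, a2⟩ := a; obtain ⟨b1, b2⟩ := b
  simp [pvBef]; omega

lemma pvR_trans (a b c : Int × Int) : pvR a b → pvR b c → pvR a c := by
  rw [pvR_iff, pvR_iff, pvR_iff]; omega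

lemma pvR_antisymm (a b : Int × Int) : pvR a b → pvR b a → a = b := by
  rw [pvR_iff, pvR_iff]
  obtain ⟨a1, a2⟩ := a; obtain ⟨b1, b2⟩ := b
  intro h1 h2
  simp at h1 h2 ⊢
  omega

-- insertion sort produces a pvR-sorted list
lemma insertBy_pairwise (x : Int × Int) (ys : List (Int × Int))
    (h : ys.Pairwise pvR) : (PySem.List.insertBy pvBef x ys).Pairwise pvR := by
  induction ys with
  | nil => simp [PySem.List.insertBy]
  | cons y ys ih =>
    rw [List.pairwise_cons] at h
    obtain ⟨hy, hys⟩ := h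
    simp only [PySem.List.insertBy]
    by_cases hb : pvBef x y = true
    · rw [if_pos hb]
      refine List.Pairwise.cons ?_ (List.Pairwise.cons hy hys)
      intro z hz
      rcases List.mem_cons.mp hz with rfl | hz'
      · exact pvBef_asym x z hb
      · exact pvR_trans x y z (pvBef_asym x y hb) (hy z hz')
    · rw [if_neg hb]
      refine List.Pairwise.cons ?_ (ih hys)
      intro z hz
      rcases (PySem.List.mem_insertBy pvBef x z ys).mp hz with rfl | hz'
      · exact Bool.eq_false_iff.mpr hb
      · exact hy z hz' 

lemma sorted2_pairwise (xs : List (Int × Int)) :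
    (PySem.List.sorted2 xs (fun e => e.1) (fun e => e.2) false).Pairwise pvR := by
  have hgen : ∀ (l : List (Int × Int)) (acc : List (Int × Int)), acc.Pairwise pvR →
      (l.foldl (fun acc x => PySem.List.insertBy pvBef x acc) acc).Pairwise pvR := by
    intro l
    induction l with
    | nil => intro acc h; exact h
    | cons z l ih =>
      intro acc h
      exact ih _ (insertBy_pairwise z acc h)
  have hdef : PySem.List.sorted2 xs (fun e => e.1) (fun e => e.2) false =
      xs.foldl (fun acc x => PySem.List.insertBy pvBef x acc) [] := rfl
  rw [hdef]
  exact hgen xs [] List.Pairwise.nil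


-- a maximal run: head p, its duplicates, then a tail not containing p
lemma run_facts (p : Int × Int) (xs : List (Int × Int)) (hp : (p :: xs).Pairwise pvR) :
    p ∉ xs.dropWhile (fun y => y == p) ∧
    pvND (p :: xs) = 1 + pvND (xs.dropWhile (fun y => y == p)) ∧
    pvNH (p :: xs) = (if 0 < (xs.takeWhile (fun y => y == p)).length then 1 else 0) +
      pvNH (xs.dropWhile (fun y => y == p)) := by
  rw [List.pairwise_cons] at hp
  obtain ⟨hpall, hxs⟩ := hp
  set f : Int × Int → Bool := fun y => y == p with hf
  set tw := xs.takeWhile f with htwdef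
  set r := xs.dropWhile f with hrdef
  have hsplit : tw ++ r = xs := List.takeWhile_append_dropWhile
  have htw : ∀ y ∈ tw, y = p := by
    intro y hy
    have := List.mem_takeWhile_imp hy
    simpa [hf] using this
  have hnot : p ∉ r := by
    intro hmem
    cases hr : r with
    | nil => rw [hr] at hmem; simp at hmem
    | cons c r2 =>
      have hchead : f c = false := by
        have := List.head?_dropWhile_not f xs
        rw [← hrdef, hr] at this
        simpa using this
      have hcp : c ≠ p := by
        intro hcp; rw [hcp] at hchead; simp [hf] at hchead
      have hsub : r.Sublist xs := List.dropWhile_sublist f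
      have hrpw : r.Pairwise pvR := hxs.sublist hsub
      rw [hr] at hmem
      rcases List.mem_cons.mp hmem with h1 | h2
      · exact hcp h1.symm
      · have hRcp : pvR c p := by
          rw [hr] at hrpw
          exact (List.pairwise_cons.mp hrpw).1 p h2
        have hRpc : pvR p c := by
          apply hpall
          exact hsub.mem (by rw [hr]; exact List.mem_cons_self)
        exact hcp (pvR_antisymm c p hRcp hRpc)
  have hfin : (p :: xs).toFinset = insert p r.toFinset := by
    ext z
    simp only [List.toFinset_cons, Finset.mem_insert, List.mem_toFinset]
    constructor
    · rintro (h1 | h2)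
      · exact Or.inl h1
      · rw [← hsplit] at h2
        rcases List.mem_append.mp h2 with h3 | h4
        · exact Or.inl (htw z h3)
        · exact Or.inr h4
    · rintro (h1 | h2)
      · exact Or.inl h1
      · exact Or.inr (by rw [← hsplit]; exact List.mem_append_right _ h2)
  have hpr : p ∉ r.toFinset := by simpa using hnot
  refine ⟨hnot, ?_, ?_⟩
  · unfold pvND
    rw [hfin, Finset.card_insert_of_notMem hpr]
    omega
  · unfold pvNH
    have hcount_p : (p :: xs).count p = 1 + tw.length := by
      rw [List.count_cons_self, ← hsplit, List.count_append]
      have h1 : tw.count p = tw.length := List.count_eq_length.mpr (fun b hb => (htw b hb).symm)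
      have h2 : r.count p = 0 := List.count_eq_zero.mpr hnot
      omega
    have hcount_e : ∀ e ∈ r, (p :: xs).count e = r.count e := by
      intro e he
      have hep : e ≠ p := fun h => hnot (h ▸ he)
      rw [List.count_cons_of_ne (by simpa using hep.symm) , ← hsplit, List.count_append]
      have h1 : tw.count e = 0 := List.count_eq_zero.mpr (fun hmem => hep (htw e hmem))
      omega
    rw [hfin, Finset.filter_insert]
    have hcongr : Finset.filter (fun k => 1 < (p :: xs).count k) r.toFinset =
        Finset.filter (fun k => 1 < r.count k) r.toFinset := by
      apply Finset.filter_congr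
      intro e he
      rw [hcount_e e (by simpa using he)]
    by_cases htl : 0 < tw.length
    · have : 1 < (p :: xs).count p := by omega
      rw [if_pos this, if_pos htl, hcongr,
        Finset.card_insert_of_notMem (fun h => hpr (Finset.mem_of_mem_filter p h))]
      omega
    · have : ¬ (1 < (p :: xs).count p) := by omega
      rw [if_neg this, if_neg htl, hcongr]
      omega

-- the scan consumes a block of duplicates of the previous element by extending the run
lemma scan_dups (l : List (Int × Int)) (p : Int × Int) (hl : ∀ y ∈ l, y = p) :
    ∀ (u s run : Int), 1 ≤ run →
      l.foldl pvScan (u, s, run, some p) = (u, s, run + (l.length : Int), some p) := by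
  induction l with
  | nil => intro u s run _; simp
  | cons y l ih =>
    intro u s run hrun
    have hy : y = p := hl y List.mem_cons_self
    rw [List.foldl_cons]
    have hstep : pvScan (u, s, run, some p) y = (u, s, run + 1, some p) := by
      rw [pvScan, if_pos ⟨by simpa using hrun, by rw [hy]⟩]
    rw [hstep, ih (fun z hz => hl z (List.mem_cons_of_mem y hz)) u s (run + 1) (by omega)]
    have : run + 1 + (l.length : Int) = run + ((l.length + 1 : Nat) : Int) := by push_cast; ring
    simp [this]

-- == the scan on the tail of a run: invariant form of the main lemma ==
lemma scan_run : ∀ (n : Nat) (xs : List (Int × Int)), xs.length ≤ n →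
    ∀ (p : Int × Int) (u s run : Int), (p :: xs).Pairwise pvR → 1 ≤ run →
    pvScanFin xs (u, s, run, some p) =
      (u + ((pvND (xs.dropWhile (fun y => y == p)) : Nat) : Int),
       (if 1 < run + ((xs.takeWhile (fun y => y == p)).length : Int) then s + 1 else s) +
         ((pvNH (xs.dropWhile (fun y => y == p)) : Nat) : Int)) := by
  intro n
  induction n with
  | zero =>
    intro xs hlen p u s run _ _
    have hnil : xs = [] := List.length_eq_zero_iff.mp (Nat.le_zero.mp hlen)
    subst hnil
    simp [pvScanFin, pvND, pvNH]
  | succ n ih =>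
    intro xs hlen p u s run hp hrun
    obtain ⟨hnot, hnd, hnh⟩ := run_facts p xs hp
    set f : Int × Int → Bool := fun y => y == p with hf
    set tw := xs.takeWhile f with htwdef
    set r := xs.dropWhile f with hrdef
    have hsplit : tw ++ r = xs := List.takeWhile_append_dropWhile
    have htw : ∀ y ∈ tw, y = p := by
      intro y hy
      have := List.mem_takeWhile_imp hy
      simpa [hf] using this
    have hfold : xs.foldl pvScan (u, s, run, some p) =
        r.foldl pvScan (u, s, run + (tw.length : Int), some p) := by
      rw [← hsplit, List.foldl_append, scan_dups tw p htw u s run hrun]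
    cases hr : r with
    | nil =>
      rw [pvScanFin, hfold, hr]
      simp [pvND, pvNH]
    | cons c r2 =>
      have hchead : f c = false := by
        have := List.head?_dropWhile_not f xs
        rw [← hrdef, hr] at this
        simpa using this
      have hcp : c ≠ p := by
        intro hcp; rw [hcp] at hchead; simp [hf] at hchead
      have hxs : xs.Pairwise pvR := (List.pairwise_cons.mp hp).2
      have hrpw : r.Pairwise pvR := hxs.sublist (List.dropWhile_sublist f)
      have hlen2 : r2.length ≤ n := by
        have h1 : r.length ≤ xs.length := (List.dropWhile_sublist f).length_le
        rw [hr] at h1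
        simp at h1
        omega
      have hstep : pvScan (u, s, run + (tw.length : Int), some p) c =
          (u + 1, (if 1 < run + (tw.length : Int) then s + 1 else s), 1, some c) := by
        rw [pvScan, if_neg]
        rintro ⟨-, heq⟩
        exact hcp (by simpa using heq)
      have hihr : pvScanFin r2 (u + 1, (if 1 < run + (tw.length : Int) then s + 1 else s), 1, some c) =
          (u + 1 + ((pvND (r2.dropWhile (fun y => y == c)) : Nat) : Int),
           (if 1 < 1 + ((r2.takeWhile (fun y => y == c)).length : Int) then
              (if 1 < run + (tw.length : Int) then s + 1 else s) + 1
            else (if 1 < run + (tw.length : Int) then s + 1 else s)) +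
             ((pvNH (r2.dropWhile (fun y => y == c)) : Nat) : Int)) := by
        apply ih r2 hlen2 c _ _ 1 (by rw [← hr]; exact hrpw) (by omega)
      obtain ⟨-, hnd2, hnh2⟩ := run_facts c r2 (by rw [← hr]; exact hrpw)
      rw [pvScanFin] at hihr ⊢
      rw [hfold, hr, List.foldl_cons, hstep]
      rw [hihr]
      refine Prod.ext ?_ ?_
      · simp only
        rw [hnd2]
        push_cast
        ring
      · simp only
        rw [hnh2]
        by_cases hk : 0 < (r2.takeWhile (fun y => y == c)).length
        · have h1 : (1 : Int) < 1 + ((r2.takeWhile (fun y => y == c)).length : Int) := by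
            have : (1 : Int) ≤ ((r2.takeWhile (fun y => y == c)).length : Int) := by exact_mod_cast hk
            omega
          rw [if_pos h1, if_pos hk]
          push_cast
          ring
        · have h1 : ¬ ((1 : Int) < 1 + ((r2.takeWhile (fun y => y == c)).length : Int)) := by
            have : ((r2.takeWhile (fun y => y == c)).length : Int) = 0 := by
              simp at hk; simp [hk]
            omega
          rw [if_neg h1, if_neg hk]
          push_cast
          ring

-- == MAIN SCAN LEMMA: on a pvR-sorted list the scan computes (distinct, heavy) ==
lemma scan_spec (xs : List (Int × Int)) (h : xs.Pairwise pvR) :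
    pvScanFin xs (0, 0, 0, none) = ((pvND xs : Int), (pvNH xs : Int)) := by
  cases hx : xs with
  | nil => simp [pvScanFin, pvND, pvNH]
  | cons x t =>
    rw [hx] at h
    obtain ⟨hnot, hnd, hnh⟩ := run_facts x t h
    have hstep : pvScan (0, 0, 0, none) x = (1, 0, 1, some x) := by
      rw [pvScan, if_neg]
      · norm_num
      · rintro ⟨h1, -⟩; simp at h1
    have := scan_run t.length t le_rfl x 1 0 1 h (by omega)
    rw [pvScanFin] at this ⊢
    rw [List.foldl_cons, hstep]
    rw [this]
    refine Prod.ext ?_ ?_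
    · simp only
      rw [hnd]
      push_cast
      ring
    · simp only
      rw [hnh]
      by_cases hk : 0 < (t.takeWhile (fun y => y == x)).length
      · have h1 : (1 : Int) < 1 + ((t.takeWhile (fun y => y == x)).length : Int) := by
          have : (1 : Int) ≤ ((t.takeWhile (fun y => y == x)).length : Int) := by exact_mod_cast hk
          omega
        rw [if_pos h1, if_pos hk]
        push_cast
        ring
      · have h1 : ¬ ((1 : Int) < 1 + ((t.takeWhile (fun y => y == x)).length : Int)) := by
          have : ((t.takeWhile (fun y => y == x)).length : Int) = 0 := by
            simp at hk; simp [hk]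
          omega
        rw [if_neg h1, if_neg hk]
        push_cast
        ring

-- ring_count components
lemma pv_frc (cycles : List (List Int)) (n : Int) :
    cycles.foldl pvFRC n = n + ((cycles.filter (fun c => decide (3 ≤ (c.length : Int)))).length : Int) := by
  induction cycles generalizing n with
  | nil => simp
  | cons c t ih =>
    rw [List.foldl_cons, List.filter_cons]
    by_cases hc : ((c.length : Int)) < 3
    · have h2 : ¬ (3 ≤ (c.length : Int)) := by omega
      simp [pvFRC, hc, ih, h2]
    · have h2 : (3 ≤ (c.length : Int)) := by omega
      simp only [pvFRC, if_neg hc, ih, h2, decide_true, if_true, List.length_cons]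
      push_cast
      ring

-- the rotated zip lists successive index pairs
lemma pv_zip_rot (cyc : List Int) (h : 1 ≤ cyc.length) :
    cyc.zip (cyc.drop 1 ++ cyc.take 1) =
      (List.range cyc.length).map
        (fun k => (cyc.getD k 0, cyc.getD ((k + 1) % cyc.length) 0)) := by
  have hn : 0 < cyc.length := h
  apply List.ext_getElem
  · simp; omega
  · intro i hi1 hi2
    have hi : i < cyc.length := by
      simp at hi1; omega
    simp only [List.getElem_zip, List.getElem_map, List.getElem_range]
    have hfst : cyc.getD i 0 = cyc[i] := List.getD_eq_getElem cyc 0 hi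
    by_cases hc : i + 1 < cyc.length
    · have hmod : (i + 1) % cyc.length = i + 1 := Nat.mod_eq_of_lt hc
      have hdl : i < (cyc.drop 1).length := by simp; omega
      have hsnd : (cyc.drop 1 ++ cyc.take 1)[i]'(by simp; omega) = cyc[i + 1]'hc := by
        rw [List.getElem_append_left hdl]
        simp
      rw [Prod.ext_iff]
      refine ⟨(List.getD_eq_getElem cyc 0 hi).symm, ?_⟩
      show (cyc.drop 1 ++ cyc.take 1)[i]'(by simp; omega) = _
      rw [hmod, hsnd]
      exact (List.getD_eq_getElem cyc 0 hc).symm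
    · have hmod : (i + 1) % cyc.length = 0 := by
        have : i + 1 = cyc.length := by omega
        simp [this]
      have hdl : ¬ i < (cyc.drop 1).length := by simp; omega
      have hsnd : (cyc.drop 1 ++ cyc.take 1)[i]'(by simp; omega) = cyc[0]'hn := by
        rw [List.getElem_append_right (by simp at hdl ⊢; omega)]
        simp only [List.length_drop]
        have h0 : i - (cyc.length - 1) = 0 := by omega
        simp [h0]
      rw [Prod.ext_iff]
      refine ⟨(List.getD_eq_getElem cyc 0 hi).symm, ?_⟩
      show (cyc.drop 1 ++ cyc.take 1)[i]'(by simp; omega) = _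
      rw [hmod, hsnd]
      exact (List.getD_eq_getElem cyc 0 hn).symm

-- A's indexed inner edge enumeration equals the zip edge enumeration
lemma pv_edges_eq (cyc : List Int) (h : ¬ ((cyc.length : Int) < 3)) :
    (PySem.List.pyRange 0 (cyc.length : Int)).map
        (fun k => pvEdge (PySem.List.pyGetD cyc k 0)
          (PySem.List.pyGetD cyc (PySem.Int.mod (k + 1) (cyc.length : Int)) 0)) =
      pvEdges cyc := by
  have h3 : 3 ≤ cyc.length := by exact_mod_cast not_lt.mp h
  unfold pvEdges
  rw [if_neg h, pv_zip_rot cyc (by omega), PySem.List.pyRange_zero_natCast, List.map_map,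
    List.map_map]
  refine List.map_congr_left ?_
  intro k _
  have hcast : ((k : Int) + 1) = ((k + 1 : Nat) : Int) := by push_cast; ring
  simp only [Function.comp, hcast, PySem.Int.mod_natCast, PySem.List.pyGetD_natCast]

-- A's nested loop is the flat dict-counting loop over all kept edges
lemma pv_A_dict (cycles : List (List Int)) :
    cycles.foldl pvGA PySem.Dict.empty = PySem.Dict.counter (cycles.flatMap pvEdges) := by
  rw [← PySem.Dict.foldl_insert_getD_add_one_eq_counter, List.foldl_flatMap]
  apply PySem.List.foldl_congr_mem
  intro d cyc _
  unfold pvGA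
  by_cases hc : ((cyc.length : Int)) < 3
  · simp [hc, pvEdges]
  · rw [if_neg hc, ← pv_edges_eq cyc hc, List.foldl_map]
    simp only [pvStepD]

-- A's outer loop, componentised
lemma pv_A_split (cycles : List (List Int)) :
    ring_edge_counts_py cycles =
      (cycles.foldl pvFRC 0,
       ((PySem.Dict.counter (cycles.flatMap pvEdges)).size : Int),
       (((PySem.Dict.counter (cycles.flatMap pvEdges)).values.countP
          (fun c => decide (1 < c)) : Nat) : Int)) := by
  unfold ring_edge_counts_py
  have hstep : (fun (st : Int × PySem.Dict (Int × Int) Int) (cyc : List Int) =>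
      let atoms := cyc.map (fun x => x)
      let m : Int := (atoms.length : Int)
      if m < 3 then st
      else
        let rc := st.1 + 1
        let d := (PySem.List.pyRange 0 m).foldl
          (fun d k =>
            let a := PySem.List.pyGetD atoms k 0
            let b := PySem.List.pyGetD atoms (PySem.Int.mod (k + 1) m) 0
            let e := pvEdge a b
            d.insert e (d.getD e 0 + 1))
          st.2
        (rc, d)) = fun st cyc => (pvFRC st.1 cyc, pvGA st.2 cyc) := by
    funext st cyc
    by_cases hc : ((cyc.length : Int)) < 3 <;>
      simp [pvFRC, pvGA, pvStepD, hc]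
  rw [hstep, PySem.List.foldl_prod_mk, pv_A_dict]

-- the counter dict's size and heavy-value count are the canonical (distinct, heavy) numbers
lemma pv_counter_stats (L : List (Int × Int)) :
    (PySem.Dict.counter L).size = pvND L ∧
    ((PySem.Dict.counter L).values.countP (fun c => decide (1 < c)) : Nat) = pvNH L := by
  have hnodup : (PySem.Set.ofList L).Nodup := PySem.Set.nodup_ofList L
  have hfin : (PySem.Set.ofList L).toFinset = L.toFinset := by
    ext a
    simp [List.mem_toFinset, PySem.Set.mem_ofList]
  constructor
  · rw [PySem.Dict.size, PySem.Dict.items_counter, List.length_map]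
    unfold pvND
    rw [← hfin, List.toFinset_card_of_nodup hnodup]
  · rw [PySem.Dict.values, PySem.Dict.items_counter, List.map_map, List.countP_map]
    have hq : ((fun c : Int => decide (1 < c)) ∘ ((fun x : (Int × Int) × Int => x.2) ∘
        (fun k => (k, (L.count k : Int))))) = fun k => decide (1 < L.count k) := by
      funext k
      simp [Function.comp]
    rw [hq, List.countP_eq_length_filter]
    unfold pvNH
    have hnodupf : ((PySem.Set.ofList L).filter (fun k => decide (1 < L.count k))).Nodup :=
      hnodup.filter _
    rw [← List.toFinset_card_of_nodup hnodupf, List.toFinset_filter, hfin]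
    congr 1
    apply Finset.filter_congr
    intro k _
    simp

-- A's answer in terms of the canonical spec
lemma pv_A_canon (cycles : List (List Int)) :
    ring_edge_counts_py cycles =
      (cycles.foldl pvFRC 0,
       ((pvND (cycles.flatMap pvEdges) : Nat) : Int),
       ((pvNH (cycles.flatMap pvEdges) : Nat) : Int)) := by
  rw [pv_A_split]
  obtain ⟨h1, h2⟩ := pv_counter_stats (cycles.flatMap pvEdges)
  rw [h1, h2]

-- (distinct, heavy) is invariant under permutation
lemma pv_perm_stats (xs ys : List (Int × Int)) (h : xs.Perm ys) :
    pvND xs = pvND ys ∧ pvNH xs = pvNH ys := by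
  constructor
  · unfold pvND
    rw [List.toFinset_eq_of_perm xs ys h]
  · unfold pvNH
    rw [List.toFinset_eq_of_perm xs ys h]
    congr 1
    apply Finset.filter_congr
    intro k _
    rw [h.count_eq]

-- B's flat edge list is A's flat edge list
lemma pv_B_edges (cycles : List (List Int)) :
    ((cycles.filter (fun c => decide (3 ≤ (c.length : Int)))).map
        (fun c => c.map (fun x => x))).flatMap
      (fun c => (c.zip (c.drop 1 ++ c.take 1)).map (fun ab => pvEdge ab.1 ab.2)) =
    cycles.flatMap pvEdges := by
  have hmap : (cycles.filter (fun c => decide (3 ≤ (c.length : Int)))).map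
      (fun c => c.map (fun x : Int => x)) = cycles.filter (fun c => decide (3 ≤ (c.length : Int))) := by
    simp
  rw [hmap]
  induction cycles with
  | nil => simp
  | cons c t ih =>
    rw [List.filter_cons, List.flatMap_cons]
    by_cases hc : (3 ≤ (c.length : Int))
    · have hc' : ¬ ((c.length : Int) < 3) := by omega
      rw [if_pos (by simpa using hc), List.flatMap_cons, ih (by simp), pvEdges, if_neg hc']
    · have hc' : ((c.length : Int) < 3) := by omega
      rw [if_neg (by simpa using hc), ih (by simp), pvEdges, if_pos hc']
      simp

-- B's port, split into ring count and the scan of the sorted flat edge list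
lemma pv_B_split (cycles : List (List Int)) :
    ring_edge_counts_py_alt cycles =
      (((cycles.filter (fun c => decide (3 ≤ (c.length : Int)))).length : Int),
       pvScanFin (PySem.List.sorted2 (cycles.flatMap pvEdges) (fun e => e.1) (fun e => e.2) false)
         (0, 0, 0, none)) := by
  unfold ring_edge_counts_py_alt pvScanFin
  simp only [pv_B_edges, List.length_map]
  rfl

-- ===== VERDICT (by name: the statement is the Claim_ definition above) =====
theorem ring_edge_counts_py_spec : Claim_equal_ring_edge_counts_py := by
  intro cycles _
  unfold Spec_ring_edge_counts_py
  rw [pv_A_canon, pv_B_split, pv_frc]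
  have hperm : (PySem.List.sorted2 (cycles.flatMap pvEdges) (fun e => e.1) (fun e => e.2)
      false).Perm (cycles.flatMap pvEdges) :=
    PySem.List.sorted2_perm _ _ _ _
  obtain ⟨h1, h2⟩ := pv_perm_stats _ _ hperm
  rw [scan_spec _ (sorted2_pairwise _), h1, h2]
  simp
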